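-- pv_equiv track=rewrite | github.com/thegeek-sys/uni | ALG2/divide_et_impera.py | es2
-- ===== SOURCE A (Python) =====
-- def es2(V):
--     sx = 0
--     dx = len(V)-1
--     while sx<=dx:
--         m = (sx+dx)//2
--         if V[m]==0:
--             return m
--         if V[m]<0:
--             sx=m+1
--         else:
--             dx=m-1
--     return None
-- ===== SOURCE B (Python) =====
-- def es2(V):
--     # Same divide-and-conquer search, but by structural recursion on shrinking
--     # sub-slices with an offset, instead of an index-pair while loop.
--     def rec(sub, off):
--         if not sub:
--             return None
--         m = (len(sub) - 1) // 2
--         x = sub[m]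
--         if x == 0:
--             return off + m
--         if x < 0:
--             return rec(sub[m+1:], off + m + 1)
--         return rec(sub[:m], off)
--     return rec(V, 0)
-- ===== Notes on version B (the rewrite author's own statement) =====
-- stated objective: alternative
-- what changed: The iterative while loop over an index pair (sx, dx) is replaced by a nested recursive helper that recurses on shrinking sub-slices of the array carrying an offset, with the midpoint computed from the slice length.
import Mathlib
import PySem

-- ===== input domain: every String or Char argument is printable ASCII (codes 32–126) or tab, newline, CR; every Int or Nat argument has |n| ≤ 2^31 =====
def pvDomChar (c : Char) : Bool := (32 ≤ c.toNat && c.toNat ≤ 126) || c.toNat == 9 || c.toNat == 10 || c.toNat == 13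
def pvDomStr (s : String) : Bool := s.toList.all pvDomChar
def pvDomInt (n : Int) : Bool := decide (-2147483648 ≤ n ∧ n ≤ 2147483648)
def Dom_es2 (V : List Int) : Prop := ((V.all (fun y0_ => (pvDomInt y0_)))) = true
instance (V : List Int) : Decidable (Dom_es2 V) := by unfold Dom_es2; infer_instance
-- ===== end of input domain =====

-- B rewrites the iterative index-pair binary search as a recursion on shrinking
-- sub-slices carrying an offset (objective: alternative decomposition, same cost).

-- ===== PORT A =====
-- the while loop over (sx, dx); V[m] via pyGet? (in range on every reachable state)
def es2Loop (V : List Int) (sx dx : Int) : Option Int :=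
  if _h : sx ≤ dx then
    let m := PySem.Int.floordiv (sx + dx) 2
    match PySem.List.pyGet? V m with
    | none => none  -- IndexError; unreachable from es2's initial bounds
    | some x =>
      if x = 0 then some m
      else if x < 0 then es2Loop V (m + 1) dx
      else es2Loop V sx (m - 1)
  else none
termination_by (dx + 1 - sx).toNat
decreasing_by
  · have := PySem.Int.floordiv_two_mid_bounds _h
    omega
  · have := PySem.Int.floordiv_two_mid_bounds _h
    omega

def es2 (V : List Int) : Option Int :=
  es2Loop V 0 (V.length - 1)

-- ===== PORT B =====
-- rec(sub, off): recursion on the current sub-slice; sub[m] with 0 ≤ m < len is getD,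
-- sub[m+1:] is drop (m+1), sub[:m] is take m (exact for these in-range nonnegative slices)
def es2Rec (sub : List Int) (off : Int) : Option Int :=
  match sub with
  | [] => none
  | a :: rest =>
    let m := ((a :: rest).length - 1) / 2
    let x := (a :: rest).getD m 0
    if x = 0 then some (off + m)
    else if x < 0 then es2Rec ((a :: rest).drop (m + 1)) (off + m + 1)
    else es2Rec ((a :: rest).take m) off
termination_by sub.length
decreasing_by
  · simp
  · simp
    omega

def es2_alt (V : List Int) : Option Int :=
  es2Rec V 0

-- ===== PRECONDITION & SPEC =====
def Spec_es2 (V : List Int) (out : Option Int) : Prop := out = es2_alt V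
instance (V : List Int) (out : Option Int) : Decidable (Spec_es2 V out) := by unfold Spec_es2; infer_instance

-- ===== CLAIM (what is proved, stated in full; the proofs are below) =====
def Claim_equal_es2 : Prop := ∀ (V : List Int), Dom_es2 V → Spec_es2 V (es2 V)

-- ===== LEMMAS AND PROOFS =====

-- unfolding equation for es2Rec on a nonempty slice
lemma es2Rec_ne_nil (sub : List Int) (off : Int) (h : sub ≠ []) :
    es2Rec sub off =
      (if sub.getD ((sub.length - 1) / 2) 0 = 0 then some (off + ((sub.length - 1) / 2 : Nat))
       else if sub.getD ((sub.length - 1) / 2) 0 < 0 then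
         es2Rec (sub.drop ((sub.length - 1) / 2 + 1)) (off + ((sub.length - 1) / 2 : Nat) + 1)
       else es2Rec (sub.take ((sub.length - 1) / 2)) off) := by
  cases sub with
  | nil => exact absurd rfl h
  | cons a rest => rw [es2Rec]

-- The loop on (sx, dx) computes exactly what rec computes on the slice V[sx : dx+1] with offset sx.
lemma es2Loop_eq_rec (V : List Int) :
    ∀ n sx dx, 0 ≤ sx → dx < (V.length : Int) → (dx + 1 - sx).toNat = n →
      es2Loop V sx dx = es2Rec ((V.drop sx.toNat).take n) sx := by
  intro n
  induction n using Nat.strong_induction_on with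
  | _ n ih =>
    intro sx dx hsx hdx hn
    rw [es2Loop]
    by_cases hle : sx ≤ dx
    · simp only [hle, dite_true]
      obtain ⟨m, hmdef⟩ : ∃ m, PySem.Int.floordiv (sx + dx) 2 = m := ⟨_, rfl⟩
      rw [hmdef]
      have hmb : m * 2 ≤ sx + dx ∧ sx + dx < (m + 1) * 2 :=
        (PySem.Int.floordiv_eq_iff_of_pos (by omega)).mp hmdef
      obtain ⟨mloc, hmloc⟩ : ∃ k, (n - 1) / 2 = k := ⟨_, rfl⟩
      have hcast : (mloc : Int) = m - sx := by omega
      have hmlocn : mloc < n := by omega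
      have hslen : ((V.drop sx.toNat).take n).length = n := by simp; omega
      have hne : (V.drop sx.toNat).take n ≠ [] := by
        intro hnil; rw [hnil] at hslen; simp at hslen; omega
      rw [PySem.List.pyGet?_eq_some_getElem (xs := V) (i := m) (by omega) (by omega)]
      rw [es2Rec_ne_nil _ sx hne, hslen, hmloc]
      have hx : ((V.drop sx.toNat).take n).getD mloc 0 = V[m.toNat]'(by omega) := by
        rw [List.getD_eq_getElem _ 0 (by rw [hslen]; omega)]
        simp only [List.getElem_take, List.getElem_drop]
        congr 1
        omega
      rw [hx]
      by_cases h0 : V[m.toNat]'(by omega) = 0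
      · simp only [h0, if_true]
        have e0 : sx + (mloc : Int) = m := by omega
        rw [e0]
      · simp only [h0, if_false]
        by_cases hneg : V[m.toNat]'(by omega) < 0
        · simp only [hneg, if_true]
          have e1 : n - (mloc + 1) = (dx + 1 - (m + 1)).toNat := by omega
          have e2 : sx.toNat + (mloc + 1) = (m + 1).toNat := by omega
          have e3 : sx + (mloc : Int) + 1 = m + 1 := by omega
          rw [List.drop_take, List.drop_drop, e1, e2, e3]
          exact ih _ (by omega) (m + 1) dx (by omega) hdx rfl
        · simp only [hneg, if_false]
          have e4 : min mloc n = (m - 1 + 1 - sx).toNat := by omega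
          rw [List.take_take, e4]
          exact ih _ (by omega) sx (m - 1) hsx (by omega) rfl
    · simp only [hle, dite_false]
      have : n = 0 := by omega
      subst this
      simp [es2Rec]

-- ===== VERDICT (by name: the statement is the Claim_ definition above) =====
theorem es2_spec : Claim_equal_es2 := by
  intro V _
  unfold Spec_es2 es2 es2_alt
  have h := es2Loop_eq_rec V V.length 0 ((V.length : Int) - 1) (by omega) (by omega) (by omega)
  simpa using h
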